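-- pv_equiv track=rewrite | github.com/panlizhangcomeon/db-query | backend/src/services/sql_parser.py | is_safe_query
-- ===== SOURCE A (Python) =====
-- def is_safe_query(sql: str) -> bool:
--     """
--     Check if the SQL query is safe to execute.
--
--     A query is considered safe if:
--     - It is a SELECT statement
--     - It does not contain dangerous keywords
--
--     Args:
--         sql: The SQL query to check
--
--     Returns:
--         True if the query is safe, False otherwise
--     """
--     dangerous_keywords = [
--         "INSERT", "UPDATE", "DELETE", "DROP", "CREATE", "ALTER",
--         "TRUNCATE", "EXEC", "EXECUTE", "GRANT", "REVOKE"
--     ]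
--
--     upper_sql = sql.upper()
--     for keyword in dangerous_keywords:
--         if keyword in upper_sql:
--             return False
--
--     return True
-- ===== SOURCE B (Python) =====
-- def is_safe_query(sql: str) -> bool:
--     """
--     Check if the SQL query is safe to execute (contains no dangerous keyword).
--     Single left-to-right scan: at each position, test whether any dangerous
--     keyword starts there (case-insensitively), instead of running one full
--     substring search per keyword over the uppercased string.
--     """
--     keywords = ("INSERT", "UPDATE", "DELETE", "DROP", "CREATE", "ALTER",
--                 "TRUNCATE", "EXEC", "EXECUTE", "GRANT", "REVOKE")
--     for i in range(len(sql)):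
--         for kw in keywords:
--             if sql[i:i + len(kw)].upper() == kw:
--                 return False
--     return True
-- ===== Notes on version B (the rewrite author's own statement) =====
-- stated objective: alternative
-- what changed: Replaces eleven independent substring scans over an uppercased copy of the whole string with one left-to-right pass over positions, matching each keyword case-insensitively in place at the current position.
import Mathlib
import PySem

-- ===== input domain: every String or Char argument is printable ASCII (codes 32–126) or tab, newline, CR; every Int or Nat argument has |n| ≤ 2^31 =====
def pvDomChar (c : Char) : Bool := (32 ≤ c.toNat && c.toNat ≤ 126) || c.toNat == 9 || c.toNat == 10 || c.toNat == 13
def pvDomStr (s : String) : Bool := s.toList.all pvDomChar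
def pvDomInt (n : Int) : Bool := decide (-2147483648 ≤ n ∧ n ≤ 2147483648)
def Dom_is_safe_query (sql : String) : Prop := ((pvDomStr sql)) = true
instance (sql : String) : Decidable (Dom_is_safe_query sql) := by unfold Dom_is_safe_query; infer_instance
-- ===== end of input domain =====

-- B replaces eleven independent substring scans over an uppercased copy with one
-- left-to-right pass that matches every keyword in place at each position (alternative
-- decomposition, same asymptotic cost).

-- ===== PORT A =====
def pvKeywordsA : List String :=
  ["INSERT", "UPDATE", "DELETE", "DROP", "CREATE", "ALTER",
   "TRUNCATE", "EXEC", "EXECUTE", "GRANT", "REVOKE"]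

-- A's for-loop with early return: recursion over the keyword list
def pvCheckA : List String → String → Bool
  | [], _ => true
  | kw :: rest, upperSql =>
      if PySem.Str.isIn kw upperSql then false else pvCheckA rest upperSql

def is_safe_query (sql : String) : Bool := pvCheckA pvKeywordsA (PySem.Str.upper sql)

-- ===== PORT B =====
def pvKeywordsB : List (List Char) :=
  ["INSERT".toList, "UPDATE".toList, "DELETE".toList, "DROP".toList, "CREATE".toList,
   "ALTER".toList, "TRUNCATE".toList, "EXEC".toList, "EXECUTE".toList, "GRANT".toList,
   "REVOKE".toList]

-- sql[i:i+len(kw)].upper() == kw, with cs the suffix sql[i:]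
def pvMatchAt (kw : List Char) (cs : List Char) : Bool :=
  PySem.Chars.upper (cs.take kw.length) == kw

-- 'for i in range(len(sql))' with early return: recursion over the suffixes of sql
def pvScan : List Char → Bool
  | [] => true
  | c :: rest =>
      if pvKeywordsB.any (fun kw => pvMatchAt kw (c :: rest)) then false else pvScan rest

def is_safe_query_alt (sql : String) : Bool := pvScan sql.toList

-- ===== PRECONDITION & SPEC =====
def Spec_is_safe_query (sql : String) (out : Bool) : Prop := out = is_safe_query_alt sql
instance (sql : String) (out : Bool) : Decidable (Spec_is_safe_query sql out) := by unfold Spec_is_safe_query; infer_instance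

-- ===== CLAIM (what is proved, stated in full; the proofs are below) =====
def Claim_equal_is_safe_query : Prop := ∀ (sql : String), Dom_is_safe_query sql → Spec_is_safe_query sql (is_safe_query sql)

-- ===== LEMMAS AND PROOFS =====

theorem pvMatchAt_iff (kw cs : List Char) :
    pvMatchAt kw cs = true ↔ kw <+: PySem.Chars.upper cs := by
  have hup : PySem.Chars.upper (cs.take kw.length) = (PySem.Chars.upper cs).take kw.length := by
    simp [PySem.Chars.upper]
  constructor
  · intro h
    have : (PySem.Chars.upper cs).take kw.length = kw := by
      simpa [pvMatchAt, hup] using h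
    exact List.prefix_iff_eq_take.mpr this.symm
  · intro h
    have := List.prefix_iff_eq_take.mp h
    simp [pvMatchAt, hup, ← this]

theorem pvCheckA_iff (kws : List String) (up : String) :
    pvCheckA kws up = true ↔ ∀ kw ∈ kws, ¬ kw.toList <:+: up.toList := by
  induction kws with
  | nil => simp [pvCheckA]
  | cons kw rest ih =>
      by_cases h : PySem.Str.isIn kw up = true
      · simp only [pvCheckA, h, if_true]
        have := PySem.Str.isIn_iff_infix (sub := kw) (s := up) |>.mp h
        constructor
        · intro hfalse; exact absurd hfalse (by simp)
        · intro hall; exact absurd this (hall kw (by simp))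
      · have hf : PySem.Str.isIn kw up = false := by simpa using h
        have hni : ¬ kw.toList <:+: up.toList := fun hc =>
          h ((PySem.Str.isIn_iff_infix (sub := kw) (s := up)).mpr hc)
        simp only [pvCheckA, hf]
        rw [if_neg (by simp), ih]
        constructor
        · intro hall k hk
          rcases List.mem_cons.mp hk with rfl | hk'
          · exact hni
          · exact hall k hk'
        · intro hall k hk; exact hall k (List.mem_cons_of_mem _ hk)

theorem pvMatchAt_nil_false (kw : List Char) (hkw : kw ≠ []) :
    pvMatchAt kw [] = false := by
  cases kw with
  | nil => exact absurd rfl hkw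
  | cons a t => simp [pvMatchAt, PySem.Chars.upper]

theorem pvKeywordsB_ne_nil : ∀ kw ∈ pvKeywordsB, kw ≠ [] := by decide

theorem pvScan_iff (cs : List Char) :
    pvScan cs = true ↔ ∀ (i : Nat), ∀ kw ∈ pvKeywordsB, pvMatchAt kw (cs.drop i) = false := by
  induction cs with
  | nil =>
      simp only [pvScan, List.drop_nil, true_iff]
      intro i kw hkw; exact pvMatchAt_nil_false kw (pvKeywordsB_ne_nil kw hkw)
  | cons c rest ih =>
      by_cases h : pvKeywordsB.any (fun kw => pvMatchAt kw (c :: rest)) = true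
      · simp only [pvScan, h, if_true]
        rcases List.any_eq_true.mp h with ⟨kw, hkw, hm⟩
        constructor
        · intro hfalse; exact absurd hfalse (by simp)
        · intro hall
          have := hall 0 kw hkw
          simp only [List.drop_zero] at this
          rw [this] at hm; exact absurd hm (by simp)
      · have hf : pvKeywordsB.any (fun kw => pvMatchAt kw (c :: rest)) = false := by simpa using h
        simp only [pvScan, hf]
        rw [if_neg (by simp), ih]
        have hnone : ∀ kw ∈ pvKeywordsB, pvMatchAt kw (c :: rest) = false := by
          intro kw hkw
          by_contra hc
          exact h (List.any_eq_true.mpr ⟨kw, hkw, by simpa using hc⟩)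
        constructor
        · intro hall i kw hkw
          cases i with
          | zero => simpa using hnone kw hkw
          | succ j => simpa using hall j kw hkw
        · intro hall i kw hkw
          simpa using hall (i + 1) kw hkw

theorem pvKeywordsB_eq : pvKeywordsB = pvKeywordsA.map String.toList := by decide

theorem pvInfix_iff_scan (kw : List Char) (cs : List Char) :
    kw <:+: PySem.Chars.upper cs ↔ ∃ i : Nat, pvMatchAt kw (cs.drop i) = true := by
  have hdrop : ∀ i : Nat, PySem.Chars.upper (cs.drop i) = (PySem.Chars.upper cs).drop i := by
    intro i; simp [PySem.Chars.upper]
  constructor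
  · intro h
    have := (PySem.Chars.exists_prefix_drop_iff_isIn (sub := kw) (s := PySem.Chars.upper cs)).mpr
      ((PySem.Chars.isIn_iff_infix kw (PySem.Chars.upper cs)).mpr h)
    rcases this with ⟨j, hj⟩
    refine ⟨j, ?_⟩
    rw [pvMatchAt_iff, hdrop]
    exact hj
  · rintro ⟨i, hi⟩
    have := (pvMatchAt_iff kw (cs.drop i)).mp hi
    rw [hdrop] at this
    exact this.isInfix.trans (List.drop_suffix i (PySem.Chars.upper cs)).isInfix

theorem is_safe_query_spec : Claim_equal_is_safe_query := by
  intro sql _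
  unfold Spec_is_safe_query
  rw [Bool.eq_iff_iff]
  unfold is_safe_query is_safe_query_alt
  rw [pvCheckA_iff, pvScan_iff]
  have hup : (PySem.Str.upper sql).toList = PySem.Chars.upper sql.toList :=
    PySem.Str.toList_upper sql
  constructor
  · intro hall i kw hkw
    rw [pvKeywordsB_eq, List.mem_map] at hkw
    rcases hkw with ⟨s, hs, rfl⟩
    by_contra hc
    have hi : pvMatchAt s.toList (sql.toList.drop i) = true := by
      cases hmv : pvMatchAt s.toList (sql.toList.drop i) with
      | false => exact absurd hmv hc
      | true => rfl
    have := (pvInfix_iff_scan s.toList sql.toList).mpr ⟨i, hi⟩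
    rw [← hup] at this
    exact hall s hs this
  · intro hall kw hkw
    rw [hup]
    intro hinf
    rcases (pvInfix_iff_scan kw.toList sql.toList).mp hinf with ⟨i, hi⟩
    have := hall i kw.toList (by rw [pvKeywordsB_eq]; exact List.mem_map_of_mem hkw)
    rw [this] at hi; exact absurd hi (by simp)
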